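-- pv_equiv track=rewrite | github.com/hmezni/daas-fsm | frequent-path-mining.py | dfs_code
-- ===== SOURCE A (Python) =====
-- def dfs_code(path, graph):
--
--     visited = set()
--     dfs_result = []
--
--     def dfs(vertex):
--         if vertex not in visited:
--             visited.add(vertex)
--             dfs_result.append(vertex)
--
--             for neighbor in graph.get(vertex, []):
--                 if neighbor not in visited:
--                     dfs(neighbor)
--
--     for v in path:
--         if v not in visited:
--             dfs(v)
--
--     return dfs_result
-- ===== SOURCE B (Python) =====
-- def dfs_code(path, graph):
--     visited = set()
--     dfs_result = []
--     for v in path: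
--         if v in visited:
--             continue
--         stack = [v]
--         while stack:
--             vertex = stack.pop()
--             if vertex in visited:
--                 continue
--             visited.add(vertex)
--             dfs_result.append(vertex)
--             stack.extend(reversed(graph.get(vertex, [])))
--     return dfs_result
-- ===== Notes on version B (the rewrite author's own statement) =====
-- stated objective: alternative
-- what changed: The recursive nested-closure DFS of A is replaced by an iterative explicit-stack DFS (pop a vertex, skip if visited, push its neighbors reversed), removing the inner recursion entirely while producing the same preorder.
import Mathlib
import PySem

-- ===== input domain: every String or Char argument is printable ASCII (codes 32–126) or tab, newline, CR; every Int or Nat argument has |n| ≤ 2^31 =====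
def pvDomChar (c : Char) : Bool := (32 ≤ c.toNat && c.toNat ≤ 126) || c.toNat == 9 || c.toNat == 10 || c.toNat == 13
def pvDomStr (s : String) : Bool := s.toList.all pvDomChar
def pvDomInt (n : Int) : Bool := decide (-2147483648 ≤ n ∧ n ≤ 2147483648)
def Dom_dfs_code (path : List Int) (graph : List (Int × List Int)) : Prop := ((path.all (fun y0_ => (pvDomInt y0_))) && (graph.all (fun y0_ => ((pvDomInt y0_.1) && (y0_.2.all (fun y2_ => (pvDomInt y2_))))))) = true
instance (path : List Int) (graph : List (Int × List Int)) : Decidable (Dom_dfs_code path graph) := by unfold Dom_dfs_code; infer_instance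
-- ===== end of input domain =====

-- B replaces A's recursive nested-closure DFS by an iterative explicit-stack DFS (same preorder); objective: alternative decomposition.

-- graph.get(v, []) — first-match association lookup via PySem.Dict (shared by both ports, both Pythons call graph.get)
def pvNbrs (graph : List (Int × List Int)) (v : Int) : List Int :=
  (PySem.Dict.mk graph).getD v []

-- ===== PORT A =====
-- 'for neighbor in graph.get(vertex, []): if neighbor not in visited: dfs(neighbor)'
def pvDfsALoop (step : Int → PySem.Set Int × List Int → PySem.Set Int × List Int) :
    List Int → PySem.Set Int × List Int → PySem.Set Int × List Int
  | [], st => st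
  | n :: ns, st =>
      pvDfsALoop step ns (if PySem.Set.contains st.1 n then st else step n st)

-- the nested 'def dfs(vertex)'; the fuel only makes the recursion total (it is never
-- exhausted for the fuel chosen below, since each recursive call visits a new vertex)
def pvDfsA (graph : List (Int × List Int)) :
    Nat → Int → PySem.Set Int × List Int → PySem.Set Int × List Int
  | 0, _, st => st
  | f + 1, v, st =>
      if PySem.Set.contains st.1 v then st
      else pvDfsALoop (pvDfsA graph f) (pvNbrs graph v) (PySem.Set.add st.1 v, st.2 ++ [v])

-- an upper bound on the recursion depth: more than the number of distinct vertices that can ever be visited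
def pvFuelA (path : List Int) (graph : List (Int × List Int)) : Nat :=
  path.length + (graph.flatMap (fun p => p.2)).length + 1

def dfs_code (path : List Int) (graph : List (Int × List Int)) : List Int :=
  (path.foldl
    (fun st v => if PySem.Set.contains st.1 v then st else pvDfsA graph (pvFuelA path graph) v st)
    (PySem.Set.empty, [])).2

-- ===== PORT B =====
-- the 'while stack:' loop; stack head = top (Python pops from the end, pushes reversed
-- neighbors, so the next pop is the first neighbor); fuel only makes the loop total
def pvDfsB (graph : List (Int × List Int)) :
    Nat → List Int → PySem.Set Int × List Int → PySem.Set Int × List Int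
  | 0, _, st => st
  | _ + 1, [], st => st
  | f + 1, v :: stk, st =>
      if PySem.Set.contains st.1 v then pvDfsB graph f stk st
      else pvDfsB graph f (pvNbrs graph v ++ stk) (PySem.Set.add st.1 v, st.2 ++ [v])

-- an upper bound on the total number of pops of one stack run
def pvFuelB (path : List Int) (graph : List (Int × List Int)) : Nat :=
  (pvFuelA path graph + 1) * (pvFuelA path graph + 1)

def dfs_code_alt (path : List Int) (graph : List (Int × List Int)) : List Int :=
  (path.foldl
    (fun st v => if PySem.Set.contains st.1 v then st else pvDfsB graph (pvFuelB path graph) [v] st)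
    (PySem.Set.empty, [])).2

-- ===== PRECONDITION & SPEC =====
def Spec_dfs_code (path : List Int) (graph : List (Int × List Int)) (out : List Int) : Prop := out = dfs_code_alt path graph
instance (path : List Int) (graph : List (Int × List Int)) (out : List Int) : Decidable (Spec_dfs_code path graph out) := by unfold Spec_dfs_code; infer_instance

-- ===== CLAIM (what is proved, stated in full; the proofs are below) =====
def Claim_equal_dfs_code : Prop := ∀ (path : List Int) (graph : List (Int × List Int)), Dom_dfs_code path graph → Spec_dfs_code path graph (dfs_code path graph)

-- ===== LEMMAS AND PROOFS =====

-- number of vertices of the universe W not yet visited: the termination measure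
def pvUnvis (W : List Int) (vis : PySem.Set Int) : Nat :=
  (PySem.List.dedup W).countP (fun x => !PySem.Set.contains vis x)

-- definitional unfoldings of the ports (structural recursions)
lemma pvDfsA_succ (g : List (Int × List Int)) (f : Nat) (v : Int) (st : PySem.Set Int × List Int) :
    pvDfsA g (f + 1) v st =
      if PySem.Set.contains st.1 v then st
      else pvDfsALoop (pvDfsA g f) (pvNbrs g v) (PySem.Set.add st.1 v, st.2 ++ [v]) := rfl

lemma pvDfsALoop_cons (step : Int → PySem.Set Int × List Int → PySem.Set Int × List Int)
    (n : Int) (ns : List Int) (st : PySem.Set Int × List Int) :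
    pvDfsALoop step (n :: ns) st =
      pvDfsALoop step ns (if PySem.Set.contains st.1 n then st else step n st) := rfl

lemma pvDfsB_cons (g : List (Int × List Int)) (f : Nat) (v : Int) (stk : List Int)
    (st : PySem.Set Int × List Int) :
    pvDfsB g (f + 1) (v :: stk) st =
      if PySem.Set.contains st.1 v then pvDfsB g f stk st
      else pvDfsB g f (pvNbrs g v ++ stk) (PySem.Set.add st.1 v, st.2 ++ [v]) := rfl

lemma pvContains_true {s : PySem.Set Int} {v : Int} (h : v ∈ s) :
    PySem.Set.contains s v = true := (PySem.Set.contains_iff s v).2 h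

lemma pvContains_false {s : PySem.Set Int} {v : Int} (h : v ∉ s) :
    ¬ PySem.Set.contains s v = true := fun hc => h ((PySem.Set.contains_iff s v).1 hc)

lemma pvContains_eq_false {s : PySem.Set Int} {v : Int} (h : v ∉ s) :
    PySem.Set.contains s v = false := by
  cases hb : PySem.Set.contains s v
  · rfl
  · exact absurd ((PySem.Set.contains_iff s v).1 hb) h

lemma pvNot_mem_of_bang {s : PySem.Set Int} {v : Int}
    (h : (!PySem.Set.contains s v) = true) : v ∉ s := by
  intro hm
  rw [pvContains_true hm] at h
  exact absurd h (by simp)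

lemma pvBang_of_not_mem {s : PySem.Set Int} {v : Int} (h : v ∉ s) :
    (!PySem.Set.contains s v) = true := by rw [pvContains_eq_false h]; rfl

lemma pvNbrs_cons (k : Int) (ns : List Int) (t : List (Int × List Int)) (v : Int) :
    pvNbrs ((k, ns) :: t) v = if k == v then ns else pvNbrs t v := by
  simp only [pvNbrs, PySem.Dict.getD_eq_get?_getD, PySem.Dict.get?_mk_cons]
  split <;> rfl

lemma pvNbrs_nil (v : Int) : pvNbrs [] v = [] := rfl

lemma pvNbrs_flat (g : List (Int × List Int)) (v x : Int) (hx : x ∈ pvNbrs g v) :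
    x ∈ g.flatMap (fun p => p.2) := by
  induction g with
  | nil => rw [pvNbrs_nil] at hx; cases hx
  | cons p t ih =>
      obtain ⟨k, ns⟩ := p
      rw [pvNbrs_cons] at hx
      rw [List.flatMap_cons, List.mem_append]
      by_cases h : k == v
      · rw [if_pos h] at hx; exact Or.inl hx
      · rw [if_neg h] at hx; exact Or.inr (ih hx)

lemma pvNbrs_len (g : List (Int × List Int)) (v : Int) :
    (pvNbrs g v).length ≤ (g.flatMap (fun p => p.2)).length := by
  induction g with
  | nil => rw [pvNbrs_nil]; simp
  | cons p t ih =>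
      obtain ⟨k, ns⟩ := p
      rw [pvNbrs_cons, List.flatMap_cons, List.length_append]
      dsimp only
      by_cases h : k == v
      · rw [if_pos h]; omega
      · rw [if_neg h]; omega

lemma pvCountP_lt {α : Type} (l : List α) (p q : α → Bool)
    (himp : ∀ x ∈ l, q x → p x) (a : α) (ha : a ∈ l) (hpa : p a) (hqa : ¬ q a = true) :
    l.countP q < l.countP p := by
  induction l with
  | nil => cases ha
  | cons b t ih =>
      rcases List.mem_cons.1 ha with rfl | hat
      · have h1 : t.countP q ≤ t.countP p :=
          List.countP_mono_left (fun x hx => himp x (List.mem_cons_of_mem _ hx))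
        simp only [List.countP_cons, hpa, hqa]
        simp
        omega
      · have hb : q b → p b := himp b (List.mem_cons_self)
        have := ih (fun x hx => himp x (List.mem_cons_of_mem _ hx)) hat
        simp only [List.countP_cons]
        by_cases hqb : q b = true
        · simp [hqb, hb hqb]; omega
        · simp [hqb]; split <;> omega

lemma pvUnvis_mono (W : List Int) (vis vis' : PySem.Set Int)
    (h : ∀ x, x ∈ vis → x ∈ vis') : pvUnvis W vis' ≤ pvUnvis W vis := by
  apply List.countP_mono_left
  intro a _ ha
  exact pvBang_of_not_mem (fun hm => pvNot_mem_of_bang ha (h a hm))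

lemma pvUnvis_strict (W : List Int) (vis : PySem.Set Int) (v : Int)
    (hvW : v ∈ W) (hv : v ∉ vis) : pvUnvis W (PySem.Set.add vis v) < pvUnvis W vis := by
  apply pvCountP_lt _ _ _ _ v
  · exact (PySem.List.mem_dedup W v).2 hvW
  · exact pvBang_of_not_mem hv
  · intro hq
    exact pvNot_mem_of_bang hq ((PySem.Set.mem_add vis v v).2 (Or.inr rfl))
  · intro x _ hx
    exact pvBang_of_not_mem
      (fun hm => pvNot_mem_of_bang hx ((PySem.Set.mem_add vis v x).2 (Or.inl hm)))

lemma pvUnvis_le (W : List Int) (vis : PySem.Set Int) : pvUnvis W vis ≤ W.length := by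
  have h1 : pvUnvis W vis ≤ (PySem.List.dedup W).length := List.countP_le_length
  have h2 : (PySem.List.dedup W).length ≤ W.length := by
    rw [PySem.List.dedup_eq_ofList]; exact PySem.Set.length_ofList_le W
  omega

lemma pvLoop_mono (step : Int → PySem.Set Int × List Int → PySem.Set Int × List Int)
    (hstep : ∀ v st x, x ∈ st.1 → x ∈ (step v st).1) :
    ∀ ns st x, x ∈ st.1 → x ∈ (pvDfsALoop step ns st).1 := by
  intro ns
  induction ns with
  | nil => intro st x hx; exact hx
  | cons n t ih =>
      intro st x hx
      rw [pvDfsALoop_cons]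
      apply ih
      split
      · exact hx
      · exact hstep n st x hx

lemma pvDfsA_mono (g : List (Int × List Int)) :
    ∀ f v st x, x ∈ st.1 → x ∈ (pvDfsA g f v st).1 := by
  intro f
  induction f with
  | zero => intro v st x hx; exact hx
  | succ f ih =>
      intro v st x hx
      rw [pvDfsA_succ]
      split
      · exact hx
      · exact pvLoop_mono _ ih _ _ x ((PySem.Set.mem_add st.1 v x).2 (Or.inl hx))

-- fuel irrelevance, one step up, for the neighbor loop
lemma pvLoopStepA (g : List (Int × List Int)) (W : List Int) (f : Nat)
    (hIH : ∀ v st, v ∈ W → pvUnvis W st.1 < f → pvDfsA g f v st = pvDfsA g (f + 1) v st) :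
    ∀ ns st, (∀ n ∈ ns, n ∈ W) → pvUnvis W st.1 < f →
      pvDfsALoop (pvDfsA g f) ns st = pvDfsALoop (pvDfsA g (f + 1)) ns st := by
  intro ns
  induction ns with
  | nil => intro st _ _; rfl
  | cons n t ih =>
      intro st hns hmu
      rw [pvDfsALoop_cons, pvDfsALoop_cons]
      by_cases hm : n ∈ st.1
      · rw [if_pos (pvContains_true hm), if_pos (pvContains_true hm)]
        exact ih st (fun x hx => hns x (List.mem_cons_of_mem _ hx)) hmu
      · rw [if_neg (pvContains_false hm), if_neg (pvContains_false hm)]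
        rw [← hIH n st (hns n List.mem_cons_self) hmu]
        apply ih _ (fun x hx => hns x (List.mem_cons_of_mem _ hx))
        exact lt_of_le_of_lt (pvUnvis_mono W _ _ (fun x => pvDfsA_mono g f n st x)) hmu

lemma pvStepA (g : List (Int × List Int)) (W : List Int)
    (hW : ∀ x ∈ g.flatMap (fun p => p.2), x ∈ W) :
    ∀ f v st, v ∈ W → pvUnvis W st.1 < f → pvDfsA g f v st = pvDfsA g (f + 1) v st := by
  intro f
  induction f with
  | zero => intro v st _ hmu; omega
  | succ f ih =>
      intro v st hvW hmu
      rw [pvDfsA_succ, pvDfsA_succ]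
      by_cases hm : v ∈ st.1
      · rw [if_pos (pvContains_true hm), if_pos (pvContains_true hm)]
      · rw [if_neg (pvContains_false hm), if_neg (pvContains_false hm)]
        apply pvLoopStepA g W f ih
        · intro n hn; exact hW n (pvNbrs_flat g v n hn)
        · have hst : pvUnvis W (PySem.Set.add st.1 v, st.2 ++ [v]).1 = pvUnvis W (PySem.Set.add st.1 v) := rfl
          rw [hst]
          have := pvUnvis_strict W st.1 v hvW hm
          omega

lemma pvLoopFoldA (g : List (Int × List Int)) (W : List Int)
    (hW : ∀ x ∈ g.flatMap (fun p => p.2), x ∈ W) (f : Nat) :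
    ∀ ns st, (∀ n ∈ ns, n ∈ W) → pvUnvis W st.1 < f →
      pvDfsALoop (pvDfsA g f) ns st = ns.foldl (fun st n => pvDfsA g (f + 1) n st) st := by
  intro ns
  induction ns with
  | nil => intro st _ _; rfl
  | cons n t ih =>
      intro st hns hmu
      rw [pvDfsALoop_cons, List.foldl_cons]
      by_cases hm : n ∈ st.1
      · have hA : pvDfsA g (f + 1) n st = st := by
          rw [pvDfsA_succ, if_pos (pvContains_true hm)]
        rw [hA, if_pos (pvContains_true hm)]
        exact ih st (fun x hx => hns x (List.mem_cons_of_mem _ hx)) hmu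
      · rw [if_neg (pvContains_false hm)]
        rw [pvStepA g W hW f n st (hns n List.mem_cons_self) hmu]
        apply ih _ (fun x hx => hns x (List.mem_cons_of_mem _ hx))
        exact lt_of_le_of_lt (pvUnvis_mono W _ _ (fun x => pvDfsA_mono g (f + 1) n st x)) hmu

-- the stack-machine run of B equals a fold of A's recursive DFS over the stack
lemma pvBFold (g : List (Int × List Int)) (W : List Int)
    (hW : ∀ x ∈ g.flatMap (fun p => p.2), x ∈ W) (FA : Nat) :
    ∀ fB stk st, (∀ x ∈ stk, x ∈ W) →
      stk.length + pvUnvis W st.1 * ((g.flatMap (fun p => p.2)).length + 1) < fB →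
      pvUnvis W st.1 < FA →
      pvDfsB g fB stk st = stk.foldl (fun st v => pvDfsA g FA v st) st := by
  intro fB
  induction fB with
  | zero => intro stk st _ hb _; omega
  | succ fB ih =>
      intro stk st hstk hb hFA
      cases stk with
      | nil => rfl
      | cons v rest =>
          obtain ⟨FA', rfl⟩ : ∃ FA', FA = FA' + 1 := ⟨FA - 1, by omega⟩
          rw [pvDfsB_cons, List.foldl_cons]
          by_cases hm : v ∈ st.1
          · have hA : pvDfsA g (FA' + 1) v st = st := by
              rw [pvDfsA_succ, if_pos (pvContains_true hm)]
            rw [hA, if_pos (pvContains_true hm)]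
            apply ih rest st (fun x hx => hstk x (List.mem_cons_of_mem _ hx)) _ hFA
            simp only [List.length_cons] at hb
            omega
          · rw [if_neg (pvContains_false hm)]
            have hvW : v ∈ W := hstk v List.mem_cons_self
            have hstrict : pvUnvis W (PySem.Set.add st.1 v) < pvUnvis W st.1 :=
              pvUnvis_strict W st.1 v hvW hm
            have hnlen : (pvNbrs g v).length ≤ (g.flatMap (fun p => p.2)).length :=
              pvNbrs_len g v
            have hfst : pvUnvis W (PySem.Set.add st.1 v, st.2 ++ [v]).1 = pvUnvis W (PySem.Set.add st.1 v) := rfl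
            have hA : pvDfsA g (FA' + 1) v st =
                pvDfsALoop (pvDfsA g FA') (pvNbrs g v) (PySem.Set.add st.1 v, st.2 ++ [v]) := by
              rw [pvDfsA_succ, if_neg (pvContains_false hm)]
            rw [hA, pvLoopFoldA g W hW FA' (pvNbrs g v) _
                  (fun n hn => hW n (pvNbrs_flat g v n hn)) (by rw [hfst]; omega),
                ← List.foldl_append]
            apply ih
            · intro x hx
              rcases List.mem_append.1 hx with hx | hx
              · exact hW x (pvNbrs_flat g v x hx)
              · exact hstk x (List.mem_cons_of_mem _ hx)
            · rw [hfst]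
              simp only [List.length_append, List.length_cons] at hb ⊢
              have hmul : pvUnvis W (PySem.Set.add st.1 v) * ((g.flatMap (fun p => p.2)).length + 1)
                  + ((g.flatMap (fun p => p.2)).length + 1)
                  ≤ pvUnvis W st.1 * ((g.flatMap (fun p => p.2)).length + 1) := by
                have h1 : pvUnvis W (PySem.Set.add st.1 v) + 1 ≤ pvUnvis W st.1 := hstrict
                calc pvUnvis W (PySem.Set.add st.1 v) * ((g.flatMap (fun p => p.2)).length + 1)
                      + ((g.flatMap (fun p => p.2)).length + 1)
                    = (pvUnvis W (PySem.Set.add st.1 v) + 1) * ((g.flatMap (fun p => p.2)).length + 1) := by ring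
                  _ ≤ pvUnvis W st.1 * ((g.flatMap (fun p => p.2)).length + 1) :=
                      Nat.mul_le_mul_right _ h1
              omega
            · rw [hfst]; omega

-- the two top-level folds over path agree
lemma pvTopFold (g : List (Int × List Int)) (W : List Int)
    (hW : ∀ x ∈ g.flatMap (fun p => p.2), x ∈ W) (FA fB : Nat)
    (hFA : ∀ vis : PySem.Set Int, pvUnvis W vis < FA)
    (hfB : ∀ vis : PySem.Set Int, 1 + pvUnvis W vis * ((g.flatMap (fun p => p.2)).length + 1) < fB) :
    ∀ (p : List Int) (st : PySem.Set Int × List Int), (∀ v ∈ p, v ∈ W) →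
      p.foldl (fun st v => if PySem.Set.contains st.1 v then st else pvDfsA g FA v st) st =
      p.foldl (fun st v => if PySem.Set.contains st.1 v then st else pvDfsB g fB [v] st) st := by
  intro p
  induction p with
  | nil => intro st _; rfl
  | cons v t ih =>
      intro st hp
      rw [List.foldl_cons, List.foldl_cons]
      have hbody : (if PySem.Set.contains st.1 v then st else pvDfsA g FA v st) =
          (if PySem.Set.contains st.1 v then st else pvDfsB g fB [v] st) := by
        by_cases hm : v ∈ st.1
        · rw [if_pos (pvContains_true hm), if_pos (pvContains_true hm)]
        · rw [if_neg (pvContains_false hm), if_neg (pvContains_false hm)]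
          rw [pvBFold g W hW FA fB [v] st
              (by intro x hx
                  simp only [List.mem_singleton] at hx
                  rw [hx]
                  exact hp v List.mem_cons_self)
              (by have := hfB st.1; simpa using this) (hFA st.1)]
          rfl
      rw [hbody]
      exact ih _ (fun x hx => hp x (List.mem_cons_of_mem _ hx))

-- ===== VERDICT (by name: the statement is the Claim_ definition above) =====
theorem dfs_code_spec : Claim_equal_dfs_code := by
  intro path graph _
  unfold Spec_dfs_code dfs_code dfs_code_alt
  have h := pvTopFold graph (path ++ graph.flatMap (fun p => p.2))
    (by intro x hx; exact List.mem_append.2 (Or.inr hx))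
    (pvFuelA path graph) (pvFuelB path graph)
    (by
      intro vis
      have := pvUnvis_le (path ++ graph.flatMap (fun p => p.2)) vis
      rw [List.length_append] at this
      unfold pvFuelA; omega)
    (by
      intro vis
      have h1 := pvUnvis_le (path ++ graph.flatMap (fun p => p.2)) vis
      rw [List.length_append] at h1
      unfold pvFuelB pvFuelA
      have h2 : pvUnvis (path ++ graph.flatMap (fun p => p.2)) vis * ((graph.flatMap (fun p => p.2)).length + 1)
          ≤ (path.length + (graph.flatMap (fun p => p.2)).length) * (path.length + (graph.flatMap (fun p => p.2)).length + 1) :=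
        Nat.mul_le_mul h1 (by omega)
      nlinarith)
    path (PySem.Set.empty, [])
    (by intro v hv; exact List.mem_append.2 (Or.inl hv))
  rw [h]
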